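-- pv_equiv track=rewrite | github.com/daniel-reich/ubiquitous-fiesta | LtwvpqeRY2gQcMQyy_9.py | sig_figs
-- ===== SOURCE A (Python) =====
-- def sig_figs(num):
--     count = 0
--     leading_z = True
--     last_index = 0
--     for i in range(len(num)):
--         if num[i].isdigit() is True:
--             if int(num[i]) != 0:
--                 last_index = i
--     for i in range(len(num)):
--         if num[i].isdigit():
--             if int(num[i]) != 0:
--                 count += 1
--                 leading_z = False
--             else:
--                 if leading_z is False and i < last_index:
--                     count += 1
--                 elif leading_z is False and i > last_index and "." in num:
--                     count += 1
--     return count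
-- ===== SOURCE B (Python) =====
-- def sig_figs(num):
--     has_dot = "." in num
--     digits = "".join(c for c in num if c.isdigit())
--     stripped = digits.lstrip("0")
--     if not stripped:
--         return 0
--     if has_dot:
--         return len(stripped)
--     return len(stripped.rstrip("0"))
-- ===== Notes on version B (the rewrite author's own statement) =====
-- stated objective: simpler
-- what changed: Replaces A's two index loops (a last-nonzero-index scan plus per-position branching on i vs last_index) with one digit-gathering pass followed by lstrip of leading zeros and, when there is no dot, rstrip of trailing zeros; the per-character Python-level branching disappears into C-level str operations, a constant-factor speedup.
import Mathlib
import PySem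

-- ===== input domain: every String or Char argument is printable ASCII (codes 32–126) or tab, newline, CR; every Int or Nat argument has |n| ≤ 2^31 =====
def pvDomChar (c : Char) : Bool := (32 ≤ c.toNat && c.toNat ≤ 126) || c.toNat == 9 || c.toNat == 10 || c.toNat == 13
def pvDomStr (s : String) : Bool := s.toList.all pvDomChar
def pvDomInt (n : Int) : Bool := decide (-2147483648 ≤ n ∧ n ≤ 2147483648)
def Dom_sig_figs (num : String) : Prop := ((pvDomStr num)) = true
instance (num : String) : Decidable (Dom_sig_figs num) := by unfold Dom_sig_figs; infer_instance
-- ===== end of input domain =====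

-- B replaces A's two index loops (last-nonzero-index scan + per-position branching) with one
-- digit-gathering pass and leading/trailing zero strips; same O(n) cost, simpler structure.

-- ===== PORT A =====
-- 'for i in range(len(num))' with body reading 'num[i]' is ported as a fold over
-- enumerate(num.toList): exactly the same indices i and characters num[i], in order.
def sig_figs (num : String) : Int :=
  let last_index : Int :=
    (PySem.List.enumerate num.toList 0).foldl
      (fun li p =>
        if PySem.Chars.isdigit p.2 then            -- num[i].isdigit() is True
          if PySem.Int.ofChars? [p.2] ≠ some 0 then p.1 else li   -- int(num[i]) != 0
        else li) 0
  ((PySem.List.enumerate num.toList 0).foldl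
      (fun (st : Int × Bool) p =>                  -- st = (count, leading_z)
        if PySem.Chars.isdigit p.2 then
          if PySem.Int.ofChars? [p.2] ≠ some 0 then (st.1 + 1, false)
          else if st.2 = false ∧ p.1 < last_index then (st.1 + 1, st.2)
          else if st.2 = false ∧ last_index < p.1 ∧ PySem.Str.isIn "." num = true then (st.1 + 1, st.2)
          else st
        else st) ((0 : Int), true)).1

-- ===== PORT B =====
-- lstrip("0") / rstrip("0") strip a run of '0' characters: dropWhile / rdropWhile (exact).
def sig_figs_alt (num : String) : Int :=
  let has_dot := PySem.Str.isIn "." num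
  let digits := num.toList.filter PySem.Chars.isdigit
  let stripped := digits.dropWhile (· == '0')
  if stripped = [] then 0
  else if has_dot then (stripped.length : Int)
  else ((stripped.rdropWhile (· == '0')).length : Int)

-- ===== PRECONDITION & SPEC =====
def Spec_sig_figs (num : String) (out : Int) : Prop := out = sig_figs_alt num
instance (num : String) (out : Int) : Decidable (Spec_sig_figs num out) := by unfold Spec_sig_figs; infer_instance

-- ===== CLAIM (what is proved, stated in full; the proofs are below) =====
def Claim_equal_sig_figs : Prop := ∀ (num : String), Dom_sig_figs num → Spec_sig_figs num (sig_figs num)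

-- ===== LEMMAS AND PROOFS =====

-- nonzero digit
def nzd (c : Char) : Bool := PySem.Chars.isdigit c && c != '0'

-- index (relative to the head) of the last nonzero digit; meaningful when one exists
def lastPos : List Char → Int
  | [] => 0
  | _ :: cs => if cs.any nzd then 1 + lastPos cs else 0

-- A's second loop body with the int(num[i]) != 0 test already simplified to p.2 ≠ '0'
def stepB (dot : Bool) (L : Int) (st : Int × Bool) (p : Int × Char) : Int × Bool :=
  if PySem.Chars.isdigit p.2 then
    if p.2 ≠ '0' then (st.1 + 1, false)
    else if st.2 = false ∧ p.1 < L then (st.1 + 1, st.2)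
    else if st.2 = false ∧ L < p.1 ∧ dot = true then (st.1 + 1, st.2)
    else st
  else st

-- purely structural count: what A's second loop adds over a suffix, given leading_z = lz
def gCount (dot : Bool) : List Char → Bool → Int
  | [], _ => 0
  | c :: cs, lz =>
    if PySem.Chars.isdigit c then
      if c ≠ '0' then 1 + gCount dot cs false
      else if lz then gCount dot cs lz
      else if cs.any nzd then 1 + gCount dot cs lz
      else if dot then 1 + gCount dot cs lz
      else gCount dot cs lz
    else gCount dot cs lz

lemma char_eq_of_toNat {c d : Char} (h : c.toNat = d.toNat) : c = d :=
  Char.ext (UInt32.toNat_inj.mp h)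

lemma ofChars_singleton_zero (c : Char) (h : PySem.Chars.isdigit c = true) :
    PySem.Int.ofChars? [c] = some 0 ↔ c = '0' := by
  have hb : 48 ≤ c.toNat ∧ c.toNat ≤ 57 := by
    simp [PySem.Chars.isdigit, Char.le_def, UInt32.le_iff_toNat_le] at h
    exact h
  have h10 : c.toNat = 48 ∨ c.toNat = 49 ∨ c.toNat = 50 ∨ c.toNat = 51 ∨ c.toNat = 52 ∨
      c.toNat = 53 ∨ c.toNat = 54 ∨ c.toNat = 55 ∨ c.toNat = 56 ∨ c.toNat = 57 := by omega
  have key : ∀ d : Char, c.toNat = d.toNat →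
      (PySem.Int.ofChars? [d] = some 0 ↔ d = '0') →
      (PySem.Int.ofChars? [c] = some 0 ↔ c = '0') := by
    intro d hdn hiff; rw [char_eq_of_toNat hdn]; exact hiff
  rcases h10 with h'|h'|h'|h'|h'|h'|h'|h'|h'|h'
  · exact key '0' (by rw [h']; decide) (by decide)
  · exact key '1' (by rw [h']; decide) (by decide)
  · exact key '2' (by rw [h']; decide) (by decide)
  · exact key '3' (by rw [h']; decide) (by decide)
  · exact key '4' (by rw [h']; decide) (by decide)
  · exact key '5' (by rw [h']; decide) (by decide)
  · exact key '6' (by rw [h']; decide) (by decide)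
  · exact key '7' (by rw [h']; decide) (by decide)
  · exact key '8' (by rw [h']; decide) (by decide)
  · exact key '9' (by rw [h']; decide) (by decide)

lemma lastPos_nonneg (cs : List Char) : 0 ≤ lastPos cs := by
  induction cs with
  | nil => simp [lastPos]
  | cons c cs ih => simp only [lastPos]; split <;> omega

lemma lastFold_eq (cs : List Char) (a li : Int) :
    (PySem.List.enumerate cs a).foldl (fun li p => if nzd p.2 then p.1 else li) li
      = if cs.any nzd then a + lastPos cs else li := by
  induction cs generalizing a li with
  | nil => simp [PySem.List.enumerate_nil]
  | cons c cs ih =>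
    rw [PySem.List.enumerate_cons, List.foldl_cons, ih]
    by_cases hc : nzd c = true <;> by_cases hcs : cs.any nzd = true <;>
      simp [hc, hcs, lastPos] <;> omega

-- main loop characterization: the fold over a suffix starting at index a, when L is the
-- global last-nonzero index (carried as the disjunctive hypothesis)
lemma loop2_eq (dot : Bool) (L : Int) (cs : List Char) :
    ∀ (a k : Int) (lz : Bool),
    ((cs.any nzd = true ∧ L = a + lastPos cs) ∨ (cs.any nzd = false ∧ L < a)) →
    (PySem.List.enumerate cs a).foldl (stepB dot L) (k, lz)
      = (k + gCount dot cs lz, lz && !cs.any nzd) := by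
  induction cs with
  | nil => intro a k lz _; simp [PySem.List.enumerate_nil, gCount]
  | cons c cs ih =>
    intro a k lz H
    rw [PySem.List.enumerate_cons, List.foldl_cons]
    have hnn := lastPos_nonneg cs
    by_cases hd : PySem.Chars.isdigit c = true
    · by_cases hz : c = '0'
      · -- zero digit: head has nzd c = false
        subst hz
        have hczf : nzd '0' = false := by decide
        have hany : (('0' :: cs).any nzd) = cs.any nzd := by simp [hczf]
        rcases H with ⟨h1, h2⟩ | ⟨h1, h2⟩
        · have hcs : cs.any nzd = true := by rw [hany] at h1; exact h1
          have hLP : lastPos ('0' :: cs) = 1 + lastPos cs := by simp [lastPos, hcs]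
          have haL : a < L := by rw [h2, hLP]; omega
          have H' : (cs.any nzd = true ∧ L = (a + 1) + lastPos cs) ∨
              (cs.any nzd = false ∧ L < a + 1) := by
            left; exact ⟨hcs, by rw [h2, hLP]; omega⟩
          cases lz
          · -- leading_z already false: i < last_index branch fires
            have : stepB dot L (k, false) (a, '0') = (k + 1, false) := by
              simp [stepB, hd, haL]
            rw [this, ih _ _ _ H']
            simp [gCount, hd, hcs, hany]; ring_nf
          · -- leading_z still true: nothing counted
            have : stepB dot L (k, true) (a, '0') = (k, true) := by
              simp [stepB, hd]
            rw [this, ih _ _ _ H']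
            simp [gCount, hd, hany]
        · -- no nonzero digit in the suffix: i > last_index, counts iff dot (and ¬lz)
          have hcs : cs.any nzd = false := by rw [hany] at h1; exact h1
          have H' : (cs.any nzd = true ∧ L = (a + 1) + lastPos cs) ∨
              (cs.any nzd = false ∧ L < a + 1) := by right; exact ⟨hcs, by omega⟩
          have hnotlt : ¬ a < L := by omega
          cases lz
          · cases dot
            · have : stepB false L (k, false) (a, '0') = (k, false) := by
                simp [stepB, hd, hnotlt]
              rw [this, ih _ _ _ H']; simp [gCount, hd, hcs, hany]
            · have : stepB true L (k, false) (a, '0') = (k + 1, false) := by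
                simp [stepB, hd, hnotlt, h2]
              rw [this, ih _ _ _ H']; simp [gCount, hd, hcs, hany]; ring_nf
          · have : stepB dot L (k, true) (a, '0') = (k, true) := by simp [stepB, hd]
            rw [this, ih _ _ _ H']; simp [gCount, hd, hany]
      · -- nonzero digit
        have hc : nzd c = true := by simp [nzd, hd, hz]
        have hstep : stepB dot L (k, lz) (a, c) = (k + 1, false) := by
          simp [stepB, hd, hz]
        have hany : (c :: cs).any nzd = true := by simp [hc]
        have H' : (cs.any nzd = true ∧ L = (a + 1) + lastPos cs) ∨
            (cs.any nzd = false ∧ L < a + 1) := by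
          by_cases hcs : cs.any nzd = true
          · left; refine ⟨hcs, ?_⟩
            rcases H with ⟨_, h2⟩ | ⟨h1, _⟩
            · rw [h2]; simp [lastPos, hcs]; try ring
            · rw [hany] at h1; exact absurd h1 (by simp)
          · right; refine ⟨by simpa using hcs, ?_⟩
            rcases H with ⟨_, h2⟩ | ⟨h1, _⟩
            · rw [h2]; simp [lastPos, hcs]; try omega
            · rw [hany] at h1; exact absurd h1 (by simp)
        rw [hstep, ih _ _ _ H']
        simp [gCount, hd, hz, hany]; ring_nf
    · -- not a digit: state unchanged
      have hc : nzd c = false := by simp [nzd, hd]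
      have hany : (c :: cs).any nzd = cs.any nzd := by simp [hc]
      have hstep : stepB dot L (k, lz) (a, c) = (k, lz) := by simp [stepB, hd]
      have H' : (cs.any nzd = true ∧ L = (a + 1) + lastPos cs) ∨
          (cs.any nzd = false ∧ L < a + 1) := by
        rcases H with ⟨h1, h2⟩ | ⟨h1, h2⟩
        · rw [hany] at h1
          left; refine ⟨h1, ?_⟩; rw [h2]; simp [lastPos, h1]; ring
        · rw [hany] at h1; right; exact ⟨h1, by omega⟩
      rw [hstep, ih _ _ _ H']
      simp [gCount, hd, hany]

-- rdropWhile through a cons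
lemma rdrop_cons_neg {p : Char → Bool} {c : Char} (l : List Char) (h : p c = false) :
    List.rdropWhile p (c :: l) = c :: List.rdropWhile p l := by
  rw [List.rdropWhile, List.rdropWhile, List.reverse_cons, List.dropWhile_append]
  by_cases hl : List.dropWhile p l.reverse = []
  · simp [hl, h]
  · simp [hl]

lemma rdrop_cons_pos {p : Char → Bool} {c : Char} (l : List Char) (h : p c = true) :
    List.rdropWhile p (c :: l)
      = if List.rdropWhile p l = [] then [] else c :: List.rdropWhile p l := by
  rw [List.rdropWhile, List.rdropWhile, List.reverse_cons, List.dropWhile_append]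
  by_cases hl : List.dropWhile p l.reverse = []
  · simp [hl, h]
  · simp [hl]

lemma rdrop_digits_nil_iff (cs : List Char) :
    List.rdropWhile (· == '0') (cs.filter PySem.Chars.isdigit) = [] ↔ cs.any nzd = false := by
  rw [List.rdropWhile_eq_nil_iff]
  simp [nzd, List.any_eq]

lemma gCount_false (dot : Bool) (cs : List Char) :
    gCount dot cs false
      = if dot then ((cs.filter PySem.Chars.isdigit).length : Int)
        else (((cs.filter PySem.Chars.isdigit).rdropWhile (· == '0')).length : Int) := by
  induction cs with
  | nil => simp [gCount]
  | cons c cs ih =>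
    by_cases hd : PySem.Chars.isdigit c = true
    · by_cases hz : c = '0'
      · subst hz
        have hr := rdrop_cons_pos (p := fun x => x == '0') (c := '0') (cs.filter PySem.Chars.isdigit) rfl
        by_cases hcs : cs.any nzd = true
        · have hne : List.rdropWhile (· == '0') (cs.filter PySem.Chars.isdigit) ≠ [] := by
            rw [Ne, rdrop_digits_nil_iff]; simp [hcs]
          cases dot <;>
            simp [gCount, hd, hcs, ih, hr, hne] <;>
            try ring_nf
        · have hnil : List.rdropWhile (· == '0') (cs.filter PySem.Chars.isdigit) = [] := by
            rw [rdrop_digits_nil_iff]; simpa using hcs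
          cases dot <;>
            simp [gCount, hd, hcs, ih, hr, hnil] <;>
            try ring_nf
      · have hpc : ((c == '0') : Bool) = false := by simpa using hz
        cases dot <;>
          simp [gCount, hd, hz, ih, rdrop_cons_neg (p := fun x => x == '0') (c := c) _ hpc] <;>
          ring_nf
    · simp [gCount, hd, ih]

lemma gCount_true (dot : Bool) (cs : List Char) :
    gCount dot cs true
      = (if dot
         then ((((cs.filter PySem.Chars.isdigit).dropWhile (· == '0')).length : Nat) : Int)
         else ((((cs.filter PySem.Chars.isdigit).dropWhile (· == '0')).rdropWhile
                  (· == '0')).length : Int)) := by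
  induction cs with
  | nil => simp [gCount]
  | cons c cs ih =>
    by_cases hd : PySem.Chars.isdigit c = true
    · by_cases hz : c = '0'
      · subst hz
        simp only [gCount, hd, if_true]
        rw [ih]
        simp [hd]
      · have hpc : ((c == '0') : Bool) = false := by simpa using hz
        have hdrop : (c :: cs.filter PySem.Chars.isdigit).dropWhile (· == '0')
            = c :: cs.filter PySem.Chars.isdigit := by simp [hpc]
        cases dot <;>
          simp [gCount, hd, hz, gCount_false, hdrop,
            rdrop_cons_neg (p := fun x => x == '0') (c := c) _ hpc] <;> ring_nf
    · simp [gCount, hd, ih]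

-- when the string has no nonzero digit at all, A's second loop never changes its state
lemma loop2_none (dot : Bool) (L : Int) (cs : List Char) :
    ∀ (a k : Int), cs.any nzd = false →
    (PySem.List.enumerate cs a).foldl (stepB dot L) (k, true) = (k, true) := by
  induction cs with
  | nil => intro a k _; simp [PySem.List.enumerate_nil]
  | cons c cs ih =>
    intro a k h
    simp only [List.any_cons, Bool.or_eq_false_iff] at h
    rw [PySem.List.enumerate_cons, List.foldl_cons]
    have hstep : stepB dot L (k, true) (a, c) = (k, true) := by
      by_cases hd : PySem.Chars.isdigit c = true
      · have hz : c = '0' := by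
          by_contra hz; rw [show nzd c = true by simp [nzd, hd, hz]] at h; simp at h
        simp [stepB, hz]
      · simp [stepB, hd]
    rw [hstep, ih _ _ h.2]

-- A's literal loop bodies coincide with their nzd/stepB forms
lemma lastBody_eq :
    (fun (li : Int) (p : Int × Char) =>
      if PySem.Chars.isdigit p.2 then
        if PySem.Int.ofChars? [p.2] ≠ some 0 then p.1 else li
      else li)
    = (fun li p => if nzd p.2 then p.1 else li) := by
  funext li p
  by_cases hd : PySem.Chars.isdigit p.2 = true
  · by_cases hz : p.2 = '0' <;>
      simp [hd, nzd, hz, ofChars_singleton_zero p.2 hd,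
        show PySem.Int.ofChars? ['0'] = some 0 from by decide]
  · simp [hd, nzd]

lemma stepBody_eq (num : String) (L : Int) :
    (fun (st : Int × Bool) (p : Int × Char) =>
      if PySem.Chars.isdigit p.2 then
        if PySem.Int.ofChars? [p.2] ≠ some 0 then (st.1 + 1, false)
        else if st.2 = false ∧ p.1 < L then (st.1 + 1, st.2)
        else if st.2 = false ∧ L < p.1 ∧ PySem.Str.isIn "." num = true then (st.1 + 1, st.2)
        else st
      else st)
    = stepB (PySem.Str.isIn "." num) L := by
  funext st p
  by_cases hd : PySem.Chars.isdigit p.2 = true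
  · by_cases hz : p.2 = '0' <;>
      simp [stepB, hd, hz, ofChars_singleton_zero p.2 hd,
        show PySem.Int.ofChars? ['0'] = some 0 from by decide]
  · simp [stepB, hd]

-- ===== VERDICT (by name: the statement is the Claim_ definition above) =====
theorem sig_figs_spec : Claim_equal_sig_figs := by
  intro num _
  unfold Spec_sig_figs sig_figs sig_figs_alt
  simp only [lastBody_eq, stepBody_eq, lastFold_eq]
  by_cases hany : num.toList.any nzd = true
  · rw [if_pos hany,
      loop2_eq (PySem.Str.isIn "." num) (0 + lastPos num.toList) num.toList 0 0 true
        (Or.inl ⟨hany, rfl⟩)]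
    simp only [gCount_true]
    by_cases hnil : (num.toList.filter PySem.Chars.isdigit).dropWhile (· == '0') = []
    · -- impossible: there is a nonzero digit, so the stripped digit string is nonempty
      exfalso
      rw [List.dropWhile_eq_nil_iff] at hnil
      rw [List.any_eq_true] at hany
      obtain ⟨c, hc, hcn⟩ := hany
      simp [nzd] at hcn
      have := hnil c (by simp [List.mem_filter, hc, hcn.1])
      simp [hcn.2] at this
    · rw [if_neg hnil]
      cases h : PySem.Str.isIn "." num <;> simp
  · have hany' : num.toList.any nzd = false := by simpa using hany
    rw [if_neg (by simp [hany']),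
      loop2_none (PySem.Str.isIn "." num) 0 num.toList 0 0 hany']
    have hnil : (num.toList.filter PySem.Chars.isdigit).dropWhile (· == '0') = [] := by
      rw [List.dropWhile_eq_nil_iff]
      intro c hc
      rw [List.mem_filter] at hc
      by_contra hz
      have hnz : nzd c = true := by
        simp only [nzd, hc.2, Bool.true_and, bne_iff_ne, ne_eq]
        simpa using hz
      have : num.toList.any nzd = true := List.any_eq_true.mpr ⟨c, hc.1, hnz⟩
      rw [this] at hany'; simp at hany'
    rw [if_pos hnil]
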